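-- pv_equiv track=rewrite | github.com/adrianmarino19/pql-agent | scripts/scrape_docs.py | strip_boilerplate_lines
-- ===== SOURCE A (Python) =====
-- LEADING_NOISE_LINES = {"Prev", "Next"}
--
-- SEARCH_FEEDBACK_BLOCK = [
--     "Search results",
--     "No results found",
--     "Was this helpful?",
--     "Yes",
--     "No",
--     "Would you like to provide feedback? Just click here to suggest edits.",
-- ]
--
-- def strip_boilerplate_lines(lines: list[str]) -> list[str]:
--     """Remove common navigation and feedback text blocks from the content lines."""
--     cleaned = list(lines)
--
--     while cleaned and cleaned[0] in LEADING_NOISE_LINES: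
--         cleaned.pop(0)
--
--     block_len = len(SEARCH_FEEDBACK_BLOCK)
--     i = 0
--     while i <= len(cleaned) - block_len:
--         if cleaned[i : i + block_len] == SEARCH_FEEDBACK_BLOCK:
--             del cleaned[i : i + block_len]
--             continue
--         i += 1
--
--     return cleaned
-- ===== SOURCE B (Python) =====
-- LEADING_NOISE_LINES = {"Prev", "Next"}
--
-- SEARCH_FEEDBACK_BLOCK = [
--     "Search results",
--     "No results found",
--     "Was this helpful?",
--     "Yes",
--     "No",
--     "Would you like to provide feedback? Just click here to suggest edits.",
-- ]
--
-- def strip_boilerplate_lines(lines: list[str]) -> list[str]: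
--     """Remove common navigation and feedback text blocks from the content lines."""
--     n = len(lines)
--     block_len = len(SEARCH_FEEDBACK_BLOCK)
--     i = 0
--     while i < n and lines[i] in LEADING_NOISE_LINES:
--         i += 1
--     out = []
--     while i < n:
--         if lines[i : i + block_len] == SEARCH_FEEDBACK_BLOCK:
--             i += block_len
--         else:
--             out.append(lines[i])
--             i += 1
--     return out
-- ===== Notes on version B (the rewrite author's own statement) =====
-- stated objective: alternative
-- what changed: Replaces the delete-and-rescan over a mutated copy (quadratic when blocks are removed) with a single forward index pass that appends kept lines to a fresh output list, skipping matched feedback blocks by advancing the index.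
import Mathlib
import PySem

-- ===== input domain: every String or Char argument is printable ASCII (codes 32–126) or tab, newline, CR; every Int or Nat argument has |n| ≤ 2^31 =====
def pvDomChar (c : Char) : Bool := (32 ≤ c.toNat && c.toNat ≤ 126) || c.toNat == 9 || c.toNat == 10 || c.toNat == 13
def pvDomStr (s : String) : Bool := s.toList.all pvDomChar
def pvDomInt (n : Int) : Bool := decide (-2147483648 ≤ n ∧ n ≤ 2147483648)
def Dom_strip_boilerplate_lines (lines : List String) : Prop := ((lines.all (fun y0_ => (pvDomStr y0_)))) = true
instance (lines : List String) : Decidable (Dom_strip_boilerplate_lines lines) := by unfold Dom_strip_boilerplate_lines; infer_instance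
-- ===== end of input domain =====

-- B replaces A's delete-and-rescan over a mutated copy by a single forward index pass
-- that appends kept lines to a fresh output list (objective: alternative).
-- A copies its argument first, so neither version mutates the caller's list.

-- ===== PORT A =====

-- SEARCH_FEEDBACK_BLOCK (module constant)
def pvBlock : List String :=
  ["Search results", "No results found", "Was this helpful?", "Yes", "No",
   "Would you like to provide feedback? Just click here to suggest edits."]

-- while cleaned and cleaned[0] in LEADING_NOISE_LINES: cleaned.pop(0)
def pvDropNoiseA : List String → List String
  | [] => []
  | h :: t => if h = "Prev" ∨ h = "Next" then pvDropNoiseA t else h :: t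

-- the second while loop of A, with a fuel parameter as a pure totality device (the
-- supplied fuel 2*len+1 strictly dominates the loop measure, so fuel never runs out);
-- 'i <= len(cleaned) - block_len' over Python ints is i + 6 ≤ cleaned.length here (exact);
-- cleaned[i:i+6] with 0 ≤ i is (cleaned.drop i).take 6; 'del cleaned[i:i+6]' is take i ++ drop (i+6)
def pvLoopA : Nat → List String → Nat → List String
  | 0, cleaned, _ => cleaned
  | fuel + 1, cleaned, i =>
    if i + 6 ≤ cleaned.length then
      if (cleaned.drop i).take 6 = pvBlock then
        pvLoopA fuel (cleaned.take i ++ cleaned.drop (i + 6)) i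
      else
        pvLoopA fuel cleaned (i + 1)
    else cleaned

def strip_boilerplate_lines (lines : List String) : List String :=
  pvLoopA (2 * (pvDropNoiseA lines).length + 1) (pvDropNoiseA lines) 0

-- ===== PORT B =====

-- while i < n and lines[i] in LEADING_NOISE_LINES: i += 1   (represented by the unskipped suffix)
def pvSkipNoiseB : List String → List String
  | [] => []
  | h :: t => if h = "Prev" ∨ h = "Next" then pvSkipNoiseB t else h :: t

-- B's forward pass: lines[i:i+6] == BLOCK is the 6-element head comparison; on a match
-- advance i by 6 (recurse on t), else emit the current line; fewer than 6 lines left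
-- can never match, and each remaining line is emitted as-is
def pvScanB : List String → List String
  | a :: b :: c :: d :: e :: f :: t =>
    if [a, b, c, d, e, f] = pvBlock then pvScanB t
    else a :: pvScanB (b :: c :: d :: e :: f :: t)
  | l => l

def strip_boilerplate_lines_alt (lines : List String) : List String :=
  pvScanB (pvSkipNoiseB lines)

-- ===== PRECONDITION & SPEC =====
def Spec_strip_boilerplate_lines (lines : List String) (out : List String) : Prop := out = strip_boilerplate_lines_alt lines
instance (lines : List String) (out : List String) : Decidable (Spec_strip_boilerplate_lines lines out) := by unfold Spec_strip_boilerplate_lines; infer_instance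

-- ===== CLAIM (what is proved, stated in full; the proofs are below) =====
def Claim_equal_strip_boilerplate_lines : Prop := ∀ (lines : List String), Dom_strip_boilerplate_lines lines → Spec_strip_boilerplate_lines lines (strip_boilerplate_lines lines)

-- ===== LEMMAS AND PROOFS =====

theorem pvScanB_short (rest : List String) (h : rest.length < 6) : pvScanB rest = rest := by
  match rest, h with
  | [], _ => rfl
  | [a], _ => rfl
  | [a, b], _ => rfl
  | [a, b, c], _ => rfl
  | [a, b, c, d], _ => rfl
  | [a, b, c, d, e], _ => rfl
  | a :: b :: c :: d :: e :: f :: t, h => simp at h; omega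

theorem pvScanB_block (rest : List String) (hm : rest.take 6 = pvBlock) :
    pvScanB rest = pvScanB (rest.drop 6) := by
  match rest with
  | a :: b :: c :: d :: e :: f :: t =>
    simp only [List.take_succ_cons, List.take_zero] at hm
    rw [pvScanB, if_pos hm]
    rfl
  | [] | [a] | [a, b] | [a, b, c] | [a, b, c, d] | [a, b, c, d, e] =>
    exact absurd (congrArg List.length hm) (by simp [pvBlock])

theorem pvScanB_cons (h : String) (t : List String) (hm : ¬ (h :: t).take 6 = pvBlock) :
    pvScanB (h :: t) = h :: pvScanB t := by
  match t with
  | b :: c :: d :: e :: f :: t' =>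
    simp only [List.take_succ_cons, List.take_zero] at hm
    rw [pvScanB, if_neg hm]
  | [] | [b] | [b, c] | [b, c, d] | [b, c, d, e] =>
    rw [pvScanB_short _ (by simp), pvScanB_short _ (by simp)]

theorem pvLoopA_eq_scan (fuel : Nat) (cleaned : List String) (i : Nat)
    (hf : 2 * cleaned.length - i < fuel) :
    pvLoopA fuel cleaned i = cleaned.take i ++ pvScanB (cleaned.drop i) := by
  induction fuel generalizing cleaned i with
  | zero => omega
  | succ fuel ih =>
    rw [pvLoopA]
    by_cases h6 : i + 6 ≤ cleaned.length
    · rw [if_pos h6]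
      by_cases hm : (cleaned.drop i).take 6 = pvBlock
      · rw [if_pos hm]
        have hti : (cleaned.take i).length = i := by simp; omega
        rw [ih _ _ (by simp only [List.length_append, List.length_take, List.length_drop]; omega)]
        rw [List.take_append, List.drop_append, hti, pvScanB_block _ hm, List.drop_drop]
        simp only [Nat.sub_self, List.take_zero, List.append_nil,
          List.take_take, Nat.min_self, List.drop_of_length_le (le_of_eq hti),
          List.nil_append, List.drop_drop]
      · rw [if_neg hm]
        have hi : i < cleaned.length := by omega
        have hm' := hm
        rw [List.drop_eq_getElem_cons hi] at hm'
        rw [ih _ _ (by omega)]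
        rw [List.drop_eq_getElem_cons hi, pvScanB_cons _ _ hm']
        rw [List.take_add_one, List.getElem?_eq_getElem hi, Option.toList_some,
          List.append_assoc, List.singleton_append]
    · rw [if_neg h6]
      rw [pvScanB_short (cleaned.drop i) (by simp; omega)]
      simp

theorem pvNoise_eq (l : List String) : pvDropNoiseA l = pvSkipNoiseB l := by
  induction l with
  | nil => rfl
  | cons h t ih => simp only [pvDropNoiseA, pvSkipNoiseB]; rw [ih]

-- ===== VERDICT (by name: the statement is the Claim_ definition above) =====
theorem strip_boilerplate_lines_spec : Claim_equal_strip_boilerplate_lines := by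
  intro lines _
  unfold Spec_strip_boilerplate_lines strip_boilerplate_lines strip_boilerplate_lines_alt
  rw [pvLoopA_eq_scan _ _ _ (by omega), pvNoise_eq]
  simp
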